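-- pv_equiv track=rewrite | github.com/pariajm/english-fisher-annotations | original_fisher_annotator.py | disfluent
-- ===== SOURCE A (Python) =====
-- def disfluent(tokens):
--     # remove first and last brackets
--     tokens, tokens[-1] = tokens[1:], tokens[-1][:-1]
--     open_bracket, close_bracket, pointer = 0, 0, 0
--     df_region = False
--     tags = []
--     wrds = []
--     while pointer < len(tokens):
--         open_bracket += tokens[pointer].count("(")
--         close_bracket += tokens[pointer].count(")")
--         if "(EDITED" in tokens[pointer]:
--             open_bracket, close_bracket = 1, 0
--             df_region = True
--
--         elif ")" in tokens[pointer]: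
--             label = "E" if df_region else "_"
--             tmp_token = tokens[pointer].replace(")", "")
--             if tmp_token in ["'s", "'d", "'re", "'ve", "'m", "'ll", "n't"]:
--                 wrds[-1] = wrds[-1]+tmp_token
--             else:
--                 wrds.append(tmp_token)
--                 tags.append(label)
--
--         if all(
--             (close_bracket,
--             open_bracket == close_bracket)
--             ):
--             open_bracket, close_bracket = 0, 0
--             df_region = False
--
--         pointer += 1
--     # return " ".join(list(map(lambda t: " ".join(t), tags)))
--     return tags
-- ===== SOURCE B (Python) =====
-- CONTRACTIONS = ("'s", "'d", "'re", "'ve", "'m", "'ll", "n't")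
--
-- def disfluent(tokens):
--     toks = tokens[1:]
--     toks[-1] = toks[-1][:-1]
--     # pass 1: record, for each token, whether it sits in a disfluency region
--     flags = []
--     opened = closed = 0
--     region = False
--     for t in toks:
--         opened += t.count("(")
--         closed += t.count(")")
--         if "(EDITED" in t:
--             opened, closed = 1, 0
--             region = True
--         flags.append(region)
--         if closed and opened == closed:
--             opened, closed = 0, 0
--             region = False
--     # pass 2: emit a tag for every closing word token that is not a contraction
--     tags = []
--     for t, f in zip(toks, flags):
--         if ")" in t and "(EDITED" not in t and t.replace(")", "") not in CONTRACTIONS: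
--             tags.append("E" if f else "_")
--     return tags
-- ===== Notes on version B (the rewrite author's own statement) =====
-- stated objective: alternative
-- what changed: A's single loop interleaves bracket bookkeeping, tag emission and maintenance of an unused word list; B decomposes the job into two passes: first record the disfluency-region flag per token, then emit tags only for closing non-contraction tokens, dropping the word list entirely.
-- crash fix: A raises IndexError when there are fewer than two tokens or when the first closing non-(EDITED token is a contraction (wrds[-1] on an empty list); B returns the tag list that simply skips the contraction token (the Raises_ block covers the contraction case). — e.g. on disfluent(["x", "n't))"]): A raises IndexError, B returns []
import Mathlib
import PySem

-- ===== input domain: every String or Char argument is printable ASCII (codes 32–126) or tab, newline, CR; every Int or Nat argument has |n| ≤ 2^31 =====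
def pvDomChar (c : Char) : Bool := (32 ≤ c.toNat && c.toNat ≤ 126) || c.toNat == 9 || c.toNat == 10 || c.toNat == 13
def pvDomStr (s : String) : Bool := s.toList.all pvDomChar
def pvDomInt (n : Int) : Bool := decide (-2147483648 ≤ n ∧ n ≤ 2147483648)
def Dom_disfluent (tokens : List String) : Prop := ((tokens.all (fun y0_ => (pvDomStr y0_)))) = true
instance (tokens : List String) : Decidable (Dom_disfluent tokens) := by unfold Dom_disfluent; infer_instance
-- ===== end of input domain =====

-- B replaces A's single loop (which also builds the unused word list) by a two-pass
-- decomposition — record region flags, then emit tags only for closing word tokens —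
-- same return value; A's side mutation of its local list copy is not caller-observable.

-- shared preprocessing of both Pythons: tokens, tokens[-1] = tokens[1:], tokens[-1][:-1]
-- (Python raises IndexError when len(tokens) < 2; Pre_ excludes that, [] here is arbitrary)
def pvPrep (tokens : List String) : List String :=
  let toks := tokens.drop 1
  match toks.getLast? with
  | some l => toks.dropLast ++ [PySem.Str.slice l none (some (-1))]
  | none => []

def pvContractions : List String := ["'s", "'d", "'re", "'ve", "'m", "'ll", "n't"]

-- ===== PORT A =====
def disfluentLoop : List String → Int → Int → Bool → List String → List String → List String
  | [], _op, _cl, _region, tags, _wrds => tags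
  | t :: rest, op, cl, region, tags, wrds =>
    let op := op + (PySem.Str.count t "(" : Int)
    let cl := cl + (PySem.Str.count t ")" : Int)
    let st :=
      if PySem.Str.isIn "(EDITED" t then ((1 : Int), (0 : Int), true, tags, wrds)
      else if PySem.Str.isIn ")" t then
        let label := if region then "E" else "_"
        let tmp := PySem.Str.replace t ")" ""
        if pvContractions.contains tmp then
          -- Python: wrds[-1] = wrds[-1] + tmp (IndexError when wrds = []; excluded by Pre_)
          (op, cl, region, tags, wrds.dropLast ++ [wrds.getLastD "" ++ tmp])
        else (op, cl, region, tags ++ [label], wrds ++ [tmp])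
      else (op, cl, region, tags, wrds)
    match st with
    | (op, cl, region, tags, wrds) =>
      if cl ≠ 0 ∧ op = cl then disfluentLoop rest 0 0 false tags wrds
      else disfluentLoop rest op cl region tags wrds

def disfluent (tokens : List String) : List String :=
  disfluentLoop (pvPrep tokens) 0 0 false [] []

-- ===== PORT B =====
-- pass 1: the region flag each token sees at the moment it is processed
def pvFlags : List String → Int → Int → Bool → List Bool
  | [], _op, _cl, _region => []
  | t :: rest, op, cl, region =>
    let op := op + (PySem.Str.count t "(" : Int)
    let cl := cl + (PySem.Str.count t ")" : Int)
    let st :=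
      if PySem.Str.isIn "(EDITED" t then ((1 : Int), (0 : Int), true)
      else (op, cl, region)
    match st with
    | (op, cl, region) =>
      region :: (if cl ≠ 0 ∧ op = cl then pvFlags rest 0 0 false else pvFlags rest op cl region)

-- a closing word token that is not a contraction gets a tag
def pvKeep (t : String) : Bool :=
  PySem.Str.isIn ")" t && !PySem.Str.isIn "(EDITED" t
    && !(pvContractions.contains (PySem.Str.replace t ")" ""))

def disfluent_alt (tokens : List String) : List String :=
  ((pvPrep tokens).zip (pvFlags (pvPrep tokens) 0 0 false)).foldl
    (fun tags tf => if pvKeep tf.1 then tags ++ [if tf.2 then "E" else "_"] else tags) []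

-- ===== PRECONDITION & SPEC =====
-- Pre_ excludes exactly the inputs where Python A raises IndexError: fewer than two tokens
-- (the initial re-bracketing indexes tokens[-1]), or the first closing non-(EDITED token is a
-- contraction, reaching wrds[-1] while wrds is still empty.
def Pre_disfluent (tokens : List String) : Prop :=
  2 ≤ tokens.length ∧
  (((pvPrep tokens).find? (fun t => PySem.Str.isIn ")" t && !PySem.Str.isIn "(EDITED" t)).all
    (fun t => !(pvContractions.contains (PySem.Str.replace t ")" "")))) = true
instance (tokens : List String) : Decidable (Pre_disfluent tokens) := by
  unfold Pre_disfluent; infer_instance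

def pvWitness_disfluent : List String := ["(S", "(EDITED", "a)", "b))"]

-- A raises IndexError (wrds[-1] on the empty wrds) when the first closing non-(EDITED token is a
-- contraction; B returns the tag list that simply skips the contraction token (Claim_raises_disfluent,
-- proved by disfluent_raises at the bottom of the file).
def Raises_disfluent (tokens : List String) : Prop :=
  2 ≤ tokens.length ∧
  (((pvPrep tokens).find? (fun t => PySem.Str.isIn ")" t && !PySem.Str.isIn "(EDITED" t)).all
    (fun t => !(pvContractions.contains (PySem.Str.replace t ")" "")))) = false
instance (tokens : List String) : Decidable (Raises_disfluent tokens) := by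
  unfold Raises_disfluent; infer_instance
def pvRaiseWitness_disfluent : List String := ["x", "n't))"]
def pvRaiseWitnessOut_disfluent : List String := []

def Spec_disfluent (tokens : List String) (out : List String) : Prop := out = disfluent_alt tokens
instance (tokens : List String) (out : List String) : Decidable (Spec_disfluent tokens out) := by
  unfold Spec_disfluent; infer_instance

-- ===== CLAIM (what is proved, stated in full; the proofs are below) =====
def Claim_equal_disfluent : Prop := ∀ (tokens : List String), Dom_disfluent tokens → Pre_disfluent tokens → Spec_disfluent tokens (disfluent tokens)
def Claim_raises_disfluent : Prop := (∀ (tokens : List String), Dom_disfluent tokens → Raises_disfluent tokens → ¬ Pre_disfluent tokens) ∧ (Dom_disfluent (pvRaiseWitness_disfluent) ∧ Raises_disfluent (pvRaiseWitness_disfluent) ∧ disfluent_alt (pvRaiseWitness_disfluent) = pvRaiseWitnessOut_disfluent)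

-- ===== LEMMAS AND PROOFS =====

-- the invariant: A's loop appends to its tag accumulator exactly the tags B's two passes
-- produce from the same starting state (the word list never influences the tags)
lemma disfluentLoop_eq_passes : ∀ (toks : List String) (op cl : Int) (region : Bool)
    (tags wrds : List String),
    disfluentLoop toks op cl region tags wrds
      = tags ++ ((toks.zip (pvFlags toks op cl region)).filter (fun tf => pvKeep tf.1)).map
          (fun tf => if tf.2 then "E" else "_") := by
  intro toks
  induction toks with
  | nil => intro op cl region tags wrds; simp [disfluentLoop, pvFlags]
  | cons t rest ih =>
    intro op cl region tags wrds
    simp only [disfluentLoop, pvFlags]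
    by_cases hE : PySem.Str.isIn "(EDITED" t = true
    · have hk : pvKeep t = false := by
        have hE' : PySem.Chars.isIn ['(', 'E', 'D', 'I', 'T', 'E', 'D'] t.toList = true := by
          simpa using hE
        simp [pvKeep, hE']
      simp only [hE, if_true]
      split_ifs with h
      · exact absurd rfl h.1
      · rw [ih]
        simp [*]
    · rw [Bool.not_eq_true] at hE
      by_cases hC : PySem.Str.isIn ")" t = true
      · by_cases hT : pvContractions.contains (PySem.Str.replace t ")" "") = true
        · have hk : pvKeep t = false := by
            have hT' : PySem.Str.replace t ")" "" ∈ pvContractions := by simpa using hT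
            simp [pvKeep, hT']
          simp only [hE, hC, hT, Bool.false_eq_true, if_false, if_true]
          split_ifs with h <;> rw [ih] <;> simp [*]
        · rw [Bool.not_eq_true] at hT
          have hk : pvKeep t = true := by
            have hE' : PySem.Chars.isIn ['(', 'E', 'D', 'I', 'T', 'E', 'D'] t.toList = false := by
              simpa using hE
            have hC' : PySem.Chars.isIn [')'] t.toList = true := by simpa using hC
            have hT' : PySem.Str.replace t ")" "" ∉ pvContractions := by simpa using hT
            simp [pvKeep, hE', hC', hT']
          simp only [hE, hC, hT, Bool.false_eq_true, if_false, if_true]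
          split_ifs with h <;> rw [ih] <;> simp [*]
      · rw [Bool.not_eq_true] at hC
        have hk : pvKeep t = false := by
          have hC' : PySem.Chars.isIn [')'] t.toList = false := by simpa using hC
          simp [pvKeep, hC']
        simp only [hE, hC, Bool.false_eq_true, if_false]
        split_ifs with h <;> rw [ih] <;> simp [*]

-- ===== VERDICT (by name: the statement is the Claim_ definition above) =====
theorem disfluent_spec : Claim_equal_disfluent := by
  intro tokens _hdom _hpre
  unfold Spec_disfluent disfluent disfluent_alt
  rw [disfluentLoop_eq_passes]
  exact (PySem.List.foldl_append_if (fun tf : String × Bool => pvKeep tf.1)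
      (fun tf : String × Bool => if tf.2 then "E" else "_")
      ((pvPrep tokens).zip (pvFlags (pvPrep tokens) 0 0 false)) []).symm

@[simp]
theorem disfluent_raises : Claim_raises_disfluent := by
  unfold Claim_raises_disfluent
  constructor
  · intro tokens _hdom hr hp
    have h1 := hp.2
    have h2 := hr.2
    rw [h2] at h1
    exact Bool.false_ne_true h1
  · exact ⟨by decide, by decide, by decide⟩
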